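-- pv_equiv track=rewrite | github.com/demisto/content | Packs/CommonScripts/Scripts/GenerateAsBuiltConfiguration/GenerateAsBuiltConfiguration.py | separate_classfier_mapper
-- ===== SOURCE A (Python) =====
-- def separate_classfier_mapper(data: list) -> tuple:
--     """
--     This function accepts the raw data and filters out classifer and mappers from it.
--
--     Args:
--     data: raw data to be filtered (can be list or dict)
--
--     Returns:
--     list : classifier data list
--     list: incoming mapper data list
--     list: outgoing mapper data list
--
--     """
--
--     classifier_list = []
--     incoming_mapper_list = []
--     outgoing_mapper_list = []
--
--     for data_item in data:
--         if data_item["type"] == "mapping-outgoing":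
--             outgoing_mapper_list.append(data_item)
--         elif data_item["type"] == "mapping-incoming":
--             incoming_mapper_list.append(data_item)
--         else:
--             classifier_list.append(data_item)
--     return classifier_list, incoming_mapper_list, outgoing_mapper_list
-- ===== SOURCE B (Python) =====
-- def separate_classfier_mapper(data: list) -> tuple:
--     return ([item for item in data
--              if item["type"] not in ("mapping-outgoing", "mapping-incoming")],
--             [item for item in data if item["type"] == "mapping-incoming"],
--             [item for item in data if item["type"] == "mapping-outgoing"])
-- ===== Notes on version B (the rewrite author's own statement) =====
-- stated objective: simpler
-- what changed: Replaces the single stateful partitioning loop over three mutable accumulators with three independent filtering comprehensions over data, returned directly as the tuple.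
import Mathlib
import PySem

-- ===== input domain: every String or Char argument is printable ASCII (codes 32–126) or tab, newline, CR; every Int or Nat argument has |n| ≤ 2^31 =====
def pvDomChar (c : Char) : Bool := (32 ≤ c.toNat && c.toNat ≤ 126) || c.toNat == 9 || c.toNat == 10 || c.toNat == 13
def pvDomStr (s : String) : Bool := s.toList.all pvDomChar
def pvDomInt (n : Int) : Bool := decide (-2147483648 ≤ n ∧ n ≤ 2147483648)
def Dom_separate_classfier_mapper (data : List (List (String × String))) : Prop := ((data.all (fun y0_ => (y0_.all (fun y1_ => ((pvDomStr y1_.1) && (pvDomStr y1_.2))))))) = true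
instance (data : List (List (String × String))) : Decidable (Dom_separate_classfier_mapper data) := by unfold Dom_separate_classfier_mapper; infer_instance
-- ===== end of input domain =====

-- B replaces A's single stateful partitioning loop with three independent filters; equivalence of the RETURN value is proved on inputs where every item has a "type" key.

-- ===== PORT A =====
-- data_item["type"]: dict lookup; Pre_ guarantees the key is present (KeyError otherwise), so the port reads it with default "".
def pvTypeOf (item : List (String × String)) : String :=
  (PySem.Dict.ofList item).getD "type" ""

def separate_classfier_mapper (data : List (List (String × String))) : (List (List (String × String))) × (List (List (String × String))) × (List (List (String × String))) :=
  data.foldl (fun acc item =>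
    if pvTypeOf item = "mapping-outgoing" then (acc.1, acc.2.1, acc.2.2 ++ [item])
    else if pvTypeOf item = "mapping-incoming" then (acc.1, acc.2.1 ++ [item], acc.2.2)
    else (acc.1 ++ [item], acc.2.1, acc.2.2)) ([], [], [])

-- ===== PORT B =====
def separate_classfier_mapper_alt (data : List (List (String × String))) : (List (List (String × String))) × (List (List (String × String))) × (List (List (String × String))) :=
  (data.filter (fun item => !(pvTypeOf item = "mapping-outgoing" || pvTypeOf item = "mapping-incoming")),
   data.filter (fun item => pvTypeOf item = "mapping-incoming"),
   data.filter (fun item => pvTypeOf item = "mapping-outgoing"))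

-- ===== PRECONDITION & SPEC =====
-- Pre_ excludes items without a "type" key, on which Python A raises KeyError.
def Pre_separate_classfier_mapper (data : List (List (String × String))) : Prop :=
  (data.all (fun item => item.any (fun kv => kv.1 == "type"))) = true
instance (data : List (List (String × String))) : Decidable (Pre_separate_classfier_mapper data) := by unfold Pre_separate_classfier_mapper; infer_instance

def pvWitness_separate_classfier_mapper : (List (List (String × String))) :=
  [[("type", "mapping-incoming"), ("name", "m1")], [("type", "classification")], [("type", "mapping-outgoing")]]

def Spec_separate_classfier_mapper (data : List (List (String × String))) (out : (List (List (String × String))) × (List (List (String × String))) × (List (List (String × String)))) : Prop := out = separate_classfier_mapper_alt data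
instance (data : List (List (String × String))) (out : (List (List (String × String))) × (List (List (String × String))) × (List (List (String × String)))) : Decidable (Spec_separate_classfier_mapper data out) := by unfold Spec_separate_classfier_mapper; infer_instance

-- ===== CLAIM (what is proved, stated in full; the proofs are below) =====
def Claim_equal_separate_classfier_mapper : Prop := ∀ (data : List (List (String × String))), Dom_separate_classfier_mapper data → Pre_separate_classfier_mapper data → Spec_separate_classfier_mapper data (separate_classfier_mapper data)

-- ===== LEMMAS AND PROOFS =====

lemma foldl_partition (data : List (List (String × String)))
    (c i o : List (List (String × String))) :
    data.foldl (fun acc item =>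
      if pvTypeOf item = "mapping-outgoing" then (acc.1, acc.2.1, acc.2.2 ++ [item])
      else if pvTypeOf item = "mapping-incoming" then (acc.1, acc.2.1 ++ [item], acc.2.2)
      else (acc.1 ++ [item], acc.2.1, acc.2.2)) (c, i, o) =
    (c ++ data.filter (fun item => !(pvTypeOf item = "mapping-outgoing" || pvTypeOf item = "mapping-incoming")),
     i ++ data.filter (fun item => pvTypeOf item = "mapping-incoming"),
     o ++ data.filter (fun item => pvTypeOf item = "mapping-outgoing")) := by
  induction data generalizing c i o with
  | nil => simp
  | cons hd tl ih =>
    by_cases ho : pvTypeOf hd = "mapping-outgoing"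
    · simp [List.foldl_cons, ho, ih]
    · by_cases hi : pvTypeOf hd = "mapping-incoming"
      · simp [List.foldl_cons, hi, ih]
      · simp [List.foldl_cons, ho, hi, ih]

-- ===== VERDICT (by name: the statement is the Claim_ definition above) =====
theorem separate_classfier_mapper_spec : Claim_equal_separate_classfier_mapper := by
  intro data _ _
  unfold Spec_separate_classfier_mapper separate_classfier_mapper separate_classfier_mapper_alt
  rw [foldl_partition]
  simp
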